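-- pv_equiv track=rewrite | github.com/NilayKantharia/100-Days-Coding-Challenge | Day-17/Insert an Element at the Bottom of a Stack GeeksForGeeks.py | insertAtBottom
-- ===== SOURCE A (Python) =====
-- def insertAtBottom(st,x):
--     temp = []
--     for i in range(len(st)):
--         temp.append(st.pop())
--     st.append(x)
--     for i in range(len(temp)-1,-1,-1):
--         st.append(temp[i])
--     return st
-- ===== SOURCE B (Python) =====
-- def insertAtBottom(st, x):
--     # Idiomatic: the "bottom of the stack" is index 0 of the list, so a single
--     # list.insert does it.  Same in-place mutation of st, same return value.
--     st.insert(0, x)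
--     return st
-- ===== Notes on version B (the rewrite author's own statement) =====
-- stated objective: idiomatic
-- what changed: Replaced the temp list and the two pop/append index loops by a single list.insert(0, x), which is exactly 'insert at the bottom' on a Python list.
import Mathlib
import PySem

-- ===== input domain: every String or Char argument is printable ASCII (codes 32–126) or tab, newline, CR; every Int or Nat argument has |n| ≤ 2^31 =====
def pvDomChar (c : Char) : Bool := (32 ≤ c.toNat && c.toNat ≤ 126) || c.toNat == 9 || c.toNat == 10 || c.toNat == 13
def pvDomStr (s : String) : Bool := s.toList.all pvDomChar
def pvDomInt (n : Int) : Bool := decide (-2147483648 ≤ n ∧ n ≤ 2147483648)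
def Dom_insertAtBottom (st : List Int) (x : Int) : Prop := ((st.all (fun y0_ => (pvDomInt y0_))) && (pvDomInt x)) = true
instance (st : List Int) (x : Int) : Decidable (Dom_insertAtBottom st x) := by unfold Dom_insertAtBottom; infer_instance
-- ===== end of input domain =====

-- B replaces A's temp list and two pop/append index loops by a single list.insert(0, x);
-- the proved equivalence is about the RETURN value only (both Pythons mutate st identically).

-- ===== PORT A =====
-- one step of the first loop: temp.append(st.pop())  (st.pop() never sees an empty list here,
-- the loop runs exactly len(st) times; getD 0 is unreachable)
def pvPopStep (p : List Int × List Int) : List Int × List Int :=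
  (p.1.dropLast, p.2 ++ [p.1.getLast?.getD 0])

def insertAtBottom (st : List Int) (x : Int) : List Int :=
  -- for i in range(len(st)): temp.append(st.pop())
  let p := (List.range st.length).foldl (fun p _ => pvPopStep p) (st, [])
  let st1 := p.1
  let temp := p.2
  -- st.append(x)
  let st2 := st1 ++ [x]
  -- for i in range(len(temp)-1, -1, -1): st.append(temp[i])
  (PySem.List.pyRange ((temp.length : Int) - 1) (-1) (-1)).foldl
    (fun acc i => acc ++ [PySem.List.pyGetD temp i 0]) st2

-- ===== PORT B =====
def insertAtBottom_alt (st : List Int) (x : Int) : List Int :=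
  PySem.List.insert st 0 x

-- ===== PRECONDITION & SPEC =====
def Spec_insertAtBottom (st : List Int) (x : Int) (out : List Int) : Prop := out = insertAtBottom_alt st x
instance (st : List Int) (x : Int) (out : List Int) : Decidable (Spec_insertAtBottom st x out) := by unfold Spec_insertAtBottom; infer_instance

-- ===== CLAIM (what is proved, stated in full; the proofs are below) =====
def Claim_equal_insertAtBottom : Prop := ∀ (st : List Int) (x : Int), Dom_insertAtBottom st x → Spec_insertAtBottom st x (insertAtBottom st x)

-- ===== LEMMAS AND PROOFS =====

-- the first loop ignores the loop index, so it is an iterate on the state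
def pvRep (n : Nat) (p : List Int × List Int) : List Int × List Int :=
  match n with
  | 0 => p
  | n + 1 => pvRep n (pvPopStep p)

theorem pvFoldl_const (l : List Nat) (p : List Int × List Int) :
    l.foldl (fun p _ => pvPopStep p) p = pvRep l.length p := by
  induction l generalizing p with
  | nil => rfl
  | cons a t ih => simp [List.foldl, pvRep, ih]

theorem pvRep_spec (st temp : List Int) :
    pvRep st.length (st, temp) = ([], temp ++ st.reverse) := by
  induction st using List.reverseRecOn generalizing temp with
  | nil => simp [pvRep]
  | append_singleton ys a ih =>
      have h1 : (ys ++ [a]).length = ys.length + 1 := by simp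
      rw [h1]
      simp only [pvRep, pvPopStep]
      simp [ih]

theorem insertAtBottom_eq (st : List Int) (x : Int) :
    insertAtBottom st x = x :: st := by
  unfold insertAtBottom
  rw [pvFoldl_const, List.length_range, pvRep_spec]
  simp only [List.nil_append]
  rw [PySem.List.pyRange_neg_one_eq_reverse]
  simp only [neg_add_cancel, sub_add_cancel]
  rw [PySem.List.foldl_append_singleton_eq_map]
  rw [List.map_reverse]
  have := PySem.List.map_pyGetD_pyRange_zero st.reverse (0 : Int)
  simp only [PySem.List.len_eq] at this ⊢
  rw [this]
  simp

theorem insertAtBottom_alt_eq (st : List Int) (x : Int) :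
    insertAtBottom_alt st x = x :: st := by
  simp [insertAtBottom_alt, PySem.List.insert_zero]

-- ===== VERDICT (by name: the statement is the Claim_ definition above) =====
theorem insertAtBottom_spec : Claim_equal_insertAtBottom := by
  intro st x _
  unfold Spec_insertAtBottom
  rw [insertAtBottom_eq, insertAtBottom_alt_eq]
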